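-- pv_equiv track=rewrite | github.com/Manish-077/jntuctf | bec_app/features.py | suggest_column_map
-- ===== SOURCE A (Python) =====
-- def suggest_column_map(columns: list[str]) -> dict[str, str]:
--     lower = {c.lower().strip(): c for c in columns}
--     aliases = {
--         "login_time_delta_hours": [
--             "login_time_delta_hours",
--             "time_delta",
--             "hours_since_last",
--         ],
--         "location_distance_km": ["location_distance_km", "distance_km", "geo_distance"],
--         "emails_per_hour": ["emails_per_hour", "email_rate"],
--         "recipient_count": ["recipient_count", "recipients", "num_recipients"],
--         "inbox_rule_changes": ["inbox_rule_changes", "rule_changes"],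
--         "subject": ["subject", "email_subject"],
--         "body": ["body", "content", "email_body"],
--     }
--     out: dict[str, str] = {}
--     for canon, names in aliases.items():
--         for n in names:
--             if n in lower:
--                 out[canon] = lower[n]
--                 break
--     return out
-- ===== SOURCE B (Python) =====
-- _ALIASES = [
--     ("login_time_delta_hours", ["login_time_delta_hours", "time_delta", "hours_since_last"]),
--     ("location_distance_km", ["location_distance_km", "distance_km", "geo_distance"]),
--     ("emails_per_hour", ["emails_per_hour", "email_rate"]),
--     ("recipient_count", ["recipient_count", "recipients", "num_recipients"]),
--     ("inbox_rule_changes", ["inbox_rule_changes", "rule_changes"]),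
--     ("subject", ["subject", "email_subject"]),
--     ("body", ["body", "content", "email_body"]),
-- ]
-- _CANONS = [canon for canon, _ in _ALIASES]
-- _REV = {n: (canon, i) for canon, names in _ALIASES for i, n in enumerate(names)}
--
--
-- def suggest_column_map(columns: list[str]) -> dict[str, str]:
--     best: dict[str, tuple[int, str]] = {}
--     for c in columns:
--         hit = _REV.get(c.lower().strip())
--         if hit is None:
--             continue
--         canon, pri = hit
--         cur = best.get(canon)
--         if cur is None or pri <= cur[0]:
--             best[canon] = (pri, c)
--     return {canon: best[canon][1] for canon in _CANONS if canon in best}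
-- ===== Notes on version B (the rewrite author's own statement) =====
-- stated objective: alternative
-- what changed: Replaces the normalization-dict build plus per-canon alias scans by a reverse alias->(canon,priority) index and a single pass over the columns keeping the best (lowest-priority, last-seen) column per canon, then emitting in canonical order.
import Mathlib
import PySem

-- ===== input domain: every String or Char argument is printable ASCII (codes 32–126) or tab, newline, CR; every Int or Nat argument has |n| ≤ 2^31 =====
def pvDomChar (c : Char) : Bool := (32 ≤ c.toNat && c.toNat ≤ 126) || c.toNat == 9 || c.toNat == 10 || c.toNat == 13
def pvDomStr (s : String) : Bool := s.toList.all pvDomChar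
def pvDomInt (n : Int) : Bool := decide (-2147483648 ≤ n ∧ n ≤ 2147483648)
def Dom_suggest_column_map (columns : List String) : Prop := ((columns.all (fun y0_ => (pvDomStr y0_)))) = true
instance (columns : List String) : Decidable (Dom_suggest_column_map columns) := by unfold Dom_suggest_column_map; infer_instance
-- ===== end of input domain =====

-- B replaces A's normalization-dict + per-canon alias scans by a reverse alias->(canon,priority)
-- index and a single best-per-canon pass over the columns (alternative decomposition, same cost).


-- ===== PORT A =====
def pvAliasesA : List (String × List String) := [
  ("login_time_delta_hours", ["login_time_delta_hours", "time_delta", "hours_since_last"]),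
  ("location_distance_km", ["location_distance_km", "distance_km", "geo_distance"]),
  ("emails_per_hour", ["emails_per_hour", "email_rate"]),
  ("recipient_count", ["recipient_count", "recipients", "num_recipients"]),
  ("inbox_rule_changes", ["inbox_rule_changes", "rule_changes"]),
  ("subject", ["subject", "email_subject"]),
  ("body", ["body", "content", "email_body"])]

-- 'for n in names: if n in lower: out[canon] = lower[n]; break'
def pvFindAlias (lower : PySem.Dict String String) : List String → Option String
  | [] => none
  | n :: rest => match lower.get? n with
    | some v => some v
    | none => pvFindAlias lower rest

def suggest_column_map (columns : List String) : List (String × String) :=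
  let lower := columns.foldl
    (fun d c => d.insert (PySem.Str.strip (PySem.Str.lower c)) c) PySem.Dict.empty
  (pvAliasesA.foldl (fun out p =>
      match pvFindAlias lower p.2 with
      | some v => out.insert p.1 v
      | none => out) (PySem.Dict.empty : PySem.Dict String String)).items

-- ===== PORT B =====
def pvAliasesB : List (String × List String) := [
  ("login_time_delta_hours", ["login_time_delta_hours", "time_delta", "hours_since_last"]),
  ("location_distance_km", ["location_distance_km", "distance_km", "geo_distance"]),
  ("emails_per_hour", ["emails_per_hour", "email_rate"]),
  ("recipient_count", ["recipient_count", "recipients", "num_recipients"]),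
  ("inbox_rule_changes", ["inbox_rule_changes", "rule_changes"]),
  ("subject", ["subject", "email_subject"]),
  ("body", ["body", "content", "email_body"])]

def pvCanonsB : List String := pvAliasesB.map (·.1)

-- _REV = {n: (canon, i) for canon, names in _ALIASES for i, n in enumerate(names)}
def pvRevB : PySem.Dict String (String × Int) :=
  pvAliasesB.foldl (fun d p =>
    (PySem.List.enumerate p.2).foldl (fun d ni => d.insert ni.2 (p.1, ni.1)) d) PySem.Dict.empty

-- one loop iteration of B: look the column's key up in the reverse index, keep the best priority
def pvStepB (best : PySem.Dict String (Int × String)) (c : String) :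
    PySem.Dict String (Int × String) :=
  match pvRevB.get? (PySem.Str.strip (PySem.Str.lower c)) with
  | none => best
  | some hit =>
    match best.get? hit.1 with
    | none => best.insert hit.1 (hit.2, c)
    | some cur => if hit.2 ≤ cur.1 then best.insert hit.1 (hit.2, c) else best

def suggest_column_map_alt (columns : List String) : List (String × String) :=
  let best := columns.foldl pvStepB PySem.Dict.empty
  pvCanonsB.filterMap (fun canon => (best.get? canon).map (fun pc => (canon, pc.2)))

-- ===== PRECONDITION & SPEC =====
def Spec_suggest_column_map (columns : List String) (out : List (String × String)) : Prop := out = suggest_column_map_alt columns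
instance (columns : List String) (out : List (String × String)) : Decidable (Spec_suggest_column_map columns out) := by unfold Spec_suggest_column_map; infer_instance

-- ===== CLAIM (what is proved, stated in full; the proofs are below) =====
def Claim_equal_suggest_column_map : Prop := ∀ (columns : List String), Dom_suggest_column_map columns → Spec_suggest_column_map columns (suggest_column_map columns)

-- ===== LEMMAS AND PROOFS =====

-- first alias of `names` present in `lower`, together with its (index-counted-from-i) priority
def pvFirstHit (lower : PySem.Dict String String) : List String → Int → Option (Int × String)
  | [], _ => none
  | n :: rest, i => match lower.get? n with
    | some v => some (i, v)
    | none => pvFirstHit lower rest (i + 1)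

def pvNamesOf (c0 : String) : List String :=
  ((pvAliasesA.find? (fun q => q.1 == c0)).map (·.2)).getD []

-- the connecting invariant between A's `lower` dict and B's `best` dict
def pvInv (lower : PySem.Dict String String) (best : PySem.Dict String (Int × String)) : Prop :=
  ∀ p ∈ pvAliasesA, best.get? p.1 = pvFirstHit lower p.2 0

lemma pvFirstHit_ge (lower : PySem.Dict String String) (names : List String) (i : Int)
    (qw : Int × String) (h : pvFirstHit lower names i = some qw) : i ≤ qw.1 := by
  induction names generalizing i with
  | nil => simp [pvFirstHit] at h
  | cons n rest ih =>
    simp only [pvFirstHit] at h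
    cases hg : lower.get? n with
    | some v => rw [hg] at h; cases h; simp
    | none => rw [hg] at h; have := ih (i + 1) h; omega

lemma pvFirstHit_insert_not_mem (lower : PySem.Dict String String) (names : List String)
    (k c : String) (i : Int) (hk : k ∉ names) :
    pvFirstHit (lower.insert k c) names i = pvFirstHit lower names i := by
  induction names generalizing i with
  | nil => rfl
  | cons n rest ih =>
    rw [List.mem_cons, not_or] at hk
    have hne : n ≠ k := fun h => hk.1 h.symm
    simp only [pvFirstHit, PySem.Dict.get?_insert_of_ne lower c hne]
    cases lower.get? n with
    | some v => rfl
    | none => exact ih (i + 1) hk.2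

lemma pvFirstHit_insert_mem (lower : PySem.Dict String String) (k c : String) :
    ∀ (names : List String) (i : Int) (jN : Nat), names.Nodup → names[jN]? = some k →
    pvFirstHit (lower.insert k c) names i =
      match pvFirstHit lower names i with
      | none => some (i + jN, c)
      | some qw => if i + (jN : Int) ≤ qw.1 then some (i + jN, c) else some qw := by
  intro names
  induction names with
  | nil => intro i jN _ hj; simp at hj
  | cons n rest ih =>
    intro i jN hnd hj
    cases jN with
    | zero =>
      simp only [List.getElem?_cons_zero, Option.some.injEq] at hj
      subst hj
      cases hg : lower.get? n with
      | some v => simp [pvFirstHit, PySem.Dict.get?_insert_self, hg]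
      | none =>
        simp only [pvFirstHit, PySem.Dict.get?_insert_self, hg]
        cases hr : pvFirstHit lower rest (i + 1) with
        | none => simp
        | some qw =>
          have := pvFirstHit_ge lower rest (i + 1) qw hr
          simp only [Int.natCast_zero, add_zero]
          rw [if_pos (by omega)]
    | succ j' =>
      simp only [List.getElem?_cons_succ] at hj
      have hkrest : k ∈ rest := List.mem_of_getElem? hj
      have hne : n ≠ k := by
        intro h; exact (List.nodup_cons.mp hnd).1 (h ▸ hkrest)
      cases hg : lower.get? n with
      | some v =>
        simp only [pvFirstHit, PySem.Dict.get?_insert_of_ne lower c hne, hg]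
        rw [if_neg (by push_cast; omega)]
      | none =>
        simp only [pvFirstHit, PySem.Dict.get?_insert_of_ne lower c hne, hg]
        rw [ih (i + 1) j' (List.nodup_cons.mp hnd).2 hj]
        have harith : i + 1 + (j' : Int) = i + ((j' + 1 : Nat) : Int) := by push_cast; ring
        cases pvFirstHit lower rest (i + 1) with
        | none => simp [harith]
        | some qw => rw [harith]

-- aliases with the same canon in the table are the same entry
lemma pvAliases_unique : ∀ p ∈ pvAliasesA, ∀ q ∈ pvAliasesA, p.1 = q.1 → p = q := by decide

-- a key not in the reverse index occurs in no alias list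
lemma pvRev_complete : ∀ p ∈ pvAliasesA, ∀ n ∈ p.2, (pvRevB.get? n).isSome = true := by decide

-- every entry of the reverse index points back at its alias-table position
lemma pvRev_char_all : ∀ kv ∈ pvRevB.items,
    (kv.2.1, pvNamesOf kv.2.1) ∈ pvAliasesA ∧ 0 ≤ kv.2.2 ∧
    (pvNamesOf kv.2.1)[kv.2.2.toNat]? = some kv.1 ∧ (pvNamesOf kv.2.1).Nodup ∧
    ∀ q ∈ pvAliasesA, q.1 ≠ kv.2.1 → kv.1 ∉ q.2 := by decide

lemma pvInv_step (lower : PySem.Dict String String) (best : PySem.Dict String (Int × String))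
    (c : String) (h : pvInv lower best) :
    pvInv (lower.insert (PySem.Str.strip (PySem.Str.lower c)) c) (pvStepB best c) := by
  intro p hp
  set k := PySem.Str.strip (PySem.Str.lower c) with hk
  cases hr : pvRevB.get? k with
  | none =>
    have hnm : k ∉ p.2 := by
      intro hmem
      have := pvRev_complete p hp k hmem
      rw [hr] at this; simp at this
    rw [pvFirstHit_insert_not_mem lower p.2 k c 0 hnm]
    simp only [pvStepB, ← hk, hr]
    exact h p hp
  | some hit =>
    have hmemit := PySem.Dict.mem_items_of_get?_eq_some pvRevB hr
    obtain ⟨hcmem, hpri0, hidx, hnd, hother⟩ := pvRev_char_all (k, hit) hmemit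
    by_cases hc : p.1 = hit.1
    · have hpq := pvAliases_unique p hp (hit.1, pvNamesOf hit.1) hcmem hc
      have hnames : p.2 = pvNamesOf hit.1 := by rw [hpq]
      rw [hnames, pvFirstHit_insert_mem lower k c (pvNamesOf hit.1) 0 hit.2.toNat hnd hidx]
      have hbest : best.get? hit.1 = pvFirstHit lower (pvNamesOf hit.1) 0 := by
        have := h (hit.1, pvNamesOf hit.1) hcmem
        simpa using this
      simp only [pvStepB, ← hk, hr, hbest, hc]
      cases hfh : pvFirstHit lower (pvNamesOf hit.1) 0 with
      | none =>
        simp [PySem.Dict.get?_insert_self, Int.toNat_of_nonneg hpri0]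
      | some qw =>
        by_cases hle : hit.2 ≤ qw.1
        · simp [PySem.Dict.get?_insert_self, Int.toNat_of_nonneg hpri0, hle]
        · simp [Int.toNat_of_nonneg hpri0, hle, hbest, hfh]
    · have hnm : k ∉ p.2 := hother p hp hc
      rw [pvFirstHit_insert_not_mem lower p.2 k c 0 hnm]
      have hget : (pvStepB best c).get? p.1 = best.get? p.1 := by
        simp only [pvStepB, ← hk, hr]
        cases best.get? hit.1 with
        | none => exact PySem.Dict.get?_insert_of_ne best (hit.2, c) hc
        | some cur =>
          by_cases hle : hit.2 ≤ cur.1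
          · simp [hle, PySem.Dict.get?_insert_of_ne best (hit.2, c) hc]
          · simp [hle]
      rw [hget]
      exact h p hp

lemma pvInv_fold (cs : List String) (lower : PySem.Dict String String)
    (best : PySem.Dict String (Int × String)) (h : pvInv lower best) :
    pvInv (cs.foldl (fun d c => d.insert (PySem.Str.strip (PySem.Str.lower c)) c) lower)
      (cs.foldl pvStepB best) := by
  induction cs generalizing lower best with
  | nil => exact h
  | cons c rest ih =>
    rw [List.foldl_cons, List.foldl_cons]
    exact ih _ _ (pvInv_step lower best c h)

lemma pvInv_empty : pvInv PySem.Dict.empty PySem.Dict.empty := by unfold pvInv; decide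

lemma pvFindAlias_eq (lower : PySem.Dict String String) (names : List String) (i : Int) :
    pvFindAlias lower names = (pvFirstHit lower names i).map (·.2) := by
  induction names generalizing i with
  | nil => rfl
  | cons n rest ih =>
    simp only [pvFindAlias, pvFirstHit]
    cases lower.get? n with
    | some v => rfl
    | none => exact ih (i + 1)

lemma pvOut_fold (l : List (String × List String)) (out : PySem.Dict String String)
    (f : String × List String → Option String)
    (hfresh : ∀ p ∈ l, out.contains p.1 = false) (hnd : (l.map (·.1)).Nodup) :
    (l.foldl (fun out p => match f p with | some v => out.insert p.1 v | none => out) out).items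
      = out.items ++ l.filterMap (fun p => (f p).map (fun v => (p.1, v))) := by
  induction l generalizing out with
  | nil => simp
  | cons p rest ih =>
    simp only [List.map_cons, List.nodup_cons] at hnd
    cases hf : f p with
    | none =>
      simp only [List.foldl_cons, hf, List.filterMap_cons, Option.map_none]
      exact ih out (fun q hq => hfresh q (List.mem_cons_of_mem _ hq)) hnd.2
    | some v =>
      simp only [List.foldl_cons, hf, List.filterMap_cons, Option.map_some]
      rw [ih (out.insert p.1 v) ?_ hnd.2]
      · rw [PySem.Dict.items_insert_of_not_contains out v (hfresh p List.mem_cons_self)]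
        simp
      · intro q hq
        rw [PySem.Dict.contains_insert]
        have hne : q.1 ≠ p.1 := by
          intro he
          exact hnd.1 (he ▸ List.mem_map_of_mem hq)
        simp [hne, hfresh q (List.mem_cons_of_mem _ hq)]

lemma pvCanonsB_eq : pvCanonsB = pvAliasesA.map (·.1) := by decide

-- ===== VERDICT (by name: the statement is the Claim_ definition above) =====
theorem suggest_column_map_spec : Claim_equal_suggest_column_map := by
  intro columns _
  unfold Spec_suggest_column_map suggest_column_map suggest_column_map_alt
  set lowerF := columns.foldl
    (fun d c => d.insert (PySem.Str.strip (PySem.Str.lower c)) c) PySem.Dict.empty with hlf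
  set bestF := columns.foldl pvStepB PySem.Dict.empty with hbf
  have hinv : pvInv lowerF bestF := pvInv_fold columns _ _ pvInv_empty
  rw [pvOut_fold pvAliasesA PySem.Dict.empty (fun p => pvFindAlias lowerF p.2)
    (by intro p _; rfl) (by decide)]
  rw [pvCanonsB_eq, List.filterMap_map]
  simp only [show (PySem.Dict.empty : PySem.Dict String String).items = [] from rfl, List.nil_append]
  apply List.filterMap_congr
  intro p hp
  have hb := hinv p hp
  simp only [Function.comp]
  rw [hb, pvFindAlias_eq lowerF p.2 0, Option.map_map]
  rfl
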